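-- pv_equiv track=rewrite | github.com/nraistrick/algorithms | string_algorithms.py | find_rotation_offset
-- ===== SOURCE A (Python) =====
-- def find_rotation_offset(first, second):
--     """
--     Finds how many right rotations are required to translate the first string
--     to the second string
--
--     * We know this algorithm enforces both input strings to have the same length of n
--     * We also know the runtime of find_unique_substrings is approximately
--       = O(a * (a - 1)/2 * (b - 1)/2)  [which can now be simplified down to]
--       = O(n * (n - 1)/2 * (n - 1)/2)
--       = O(n * (n - 1))
--     * We make the simplistic assumptions that the average number of unique
--     substrings returned is equal to n and the average substring length is n/2.
--     Therefore, for n substrings, we have (n + 1 - n/2) iterations.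
--
--     Hence, This implementation's runtime is approximately O(n(n - 1) + n(n + 1 - n/2))
--
--     * We know for any loop that the algorithm stores the current substring
--     which we assume has an average length of n/2
--
--     Therefore, its space complexity is approximately O(n/2)
--
--     :param str first: The first string
--     :param str second: The second string
--     :return: The number of right rotations to translate the first to the second message
--     :rtype: int
--     """
--     if len(first) != len(second):
--         raise ValueError("The provided strings need to be the same length")
--
--     if first == second:
--         return 0
--
--     for unique_substring in find_unique_substrings(first, second):
--         for i in range(len(second) + 1 - len(unique_substring)):
--             if second[i: i + len(unique_substring)] == unique_substring:
--                 return i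
--
--     raise Exception("The two provided strings are not rotated versions of each other")
--
-- def find_unique_substrings(first, second):
--     """
--     For two strings, find the unique substrings that are present only once in
--     both strings. In this case, we produce the substrings in order of shortest
--     first.
--
--     To calculate the runtime of this algorithm, we define the length the first
--     string as 'a' and the length of the second string as 'b'. We can see that
--     there are approximately 'a' outer loops, and determine that there are two
--     further nested inner loops with an average number of iterations of (a-1)/2
--     and (b-1)/2 respectively.
--
--     * This implementation's runtime is approximately O(a * (a-1)/2 * (b-1)/2)
--     * Its space complexity is O(1)
--
--     :param str first: The first string
--     :param str second: The second string
--     :rtype: str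
--     """
--     for unique_character_count in range(1, len(first)):
--         for f in range(len(first) + 1 - unique_character_count):
--             unique_chars = first[f: f + unique_character_count]
--
--             unique = False
--             for k in range(len(second) + 1 - unique_character_count):
--                 if unique_chars == second[k: k + unique_character_count]:
--                     if unique:
--                         unique = False
--                         break
--                     unique = True
--
--             if unique:
--                 yield unique_chars
-- ===== SOURCE B (Python) =====
-- def find_rotation_offset(first, second):
--     """Per substring length, build one dict over second's windows holding
--     (occurrence count, first position); scan first's windows against it.
--     Replaces A's nested per-substring scans of second with a single hashed pass."""
--     if len(first) != len(second):
--         raise ValueError("The provided strings need to be the same length")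
--
--     if first == second:
--         return 0
--
--     n = len(first)
--     for length in range(1, n):
--         occ = {}
--         for k in range(len(second) + 1 - length):
--             s = second[k:k + length]
--             c, p = occ.get(s, (0, k))
--             occ[s] = (c + 1, p)
--         for f in range(n + 1 - length):
--             e = occ.get(first[f:f + length])
--             if e is not None and e[0] == 1:
--                 return e[1]
--
--     raise Exception("The two provided strings are not rotated versions of each other")
-- ===== Notes on version B (the rewrite author's own statement) =====
-- stated objective: faster
-- what changed: Per substring length B builds one dict over second's windows mapping each window to (occurrence count, first position), then looks each window of first up in it, replacing A's generator with a per-candidate rescan of second for uniqueness plus a separate scan of second to locate the match.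
import Mathlib
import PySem

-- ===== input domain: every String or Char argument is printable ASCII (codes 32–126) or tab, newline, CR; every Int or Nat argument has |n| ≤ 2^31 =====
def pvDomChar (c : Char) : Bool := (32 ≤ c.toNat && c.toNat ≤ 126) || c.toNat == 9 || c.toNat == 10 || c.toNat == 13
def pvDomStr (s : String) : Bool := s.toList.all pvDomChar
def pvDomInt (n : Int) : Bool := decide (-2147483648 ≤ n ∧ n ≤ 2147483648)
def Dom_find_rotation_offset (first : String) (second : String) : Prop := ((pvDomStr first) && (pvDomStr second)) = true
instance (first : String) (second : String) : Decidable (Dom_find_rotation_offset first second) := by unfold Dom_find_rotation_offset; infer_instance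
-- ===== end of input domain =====

-- B replaces A's per-substring rescans of `second` with one dict of (count, first position) per length; measurably faster.
-- A raises (ValueError / Exception) exactly outside Pre_; there both ports return a default 0.

-- shared helper: Python's s[f : f+L] for natural f, L (PySem.List.slice, exact)
def pySub (xs : List Char) (f L : Nat) : List Char :=
  PySem.List.slice xs (some (f : Int)) (some ((f + L : Nat) : Int))

-- ===== PORT A =====
-- inner `for k in range(...)` loop of find_unique_substrings, with its `unique` flag and break
def uniqLoopA (sec sub : List Char) (L : Nat) : List Nat → Bool → Bool
  | [], unique => unique
  | k :: ks, unique =>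
    if pySub sec k L = sub then
      (if unique then false else uniqLoopA sec sub L ks true)
    else uniqLoopA sec sub L ks unique

-- find_unique_substrings(first, second), materialised in yield order (lengths 1..n-1, then start pos)
def uniqueSubstringsA (fst sec : List Char) : List (List Char) :=
  (List.range' 1 (fst.length - 1)).flatMap (fun L =>
    (List.range (fst.length + 1 - L)).filterMap (fun f =>
      if uniqLoopA sec (pySub fst f L) L (List.range (sec.length + 1 - L)) false then
        some (pySub fst f L)
      else none))

-- `for i in range(len(second) + 1 - len(sub)): if second[i:i+len(sub)] == sub: return i`
def firstMatch (sec : List Char) (L : Nat) : List Nat → List Char → Option Nat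
  | [], _ => none
  | i :: is_, sub => if pySub sec i L = sub then some i else firstMatch sec L is_ sub

-- outer `for unique_substring in ...` loop
def searchA (sec : List Char) : List (List Char) → Option Nat
  | [] => none
  | sub :: rest =>
    match firstMatch sec sub.length (List.range (sec.length + 1 - sub.length)) sub with
    | some i => some i
    | none => searchA sec rest

def find_rotation_offset (first : String) (second : String) : Int :=
  if first.toList.length ≠ second.toList.length then 0   -- Python raises ValueError (outside Pre_)
  else if first.toList = second.toList then 0
  else match searchA second.toList (uniqueSubstringsA first.toList second.toList) with
    | some i => (i : Int)
    | none => 0                                          -- Python raises Exception (outside Pre_)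

-- ===== PORT B =====
-- one pass over second's windows: dict  window ↦ (count, first position)
def buildOcc (sec : List Char) (L : Nat) : PySem.Dict (List Char) (Int × Int) :=
  (List.range (sec.length + 1 - L)).foldl (fun d k =>
    d.insert (pySub sec k L)
      ((d.getD (pySub sec k L) (0, (k : Int))).1 + 1,
       (d.getD (pySub sec k L) (0, (k : Int))).2)) PySem.Dict.empty

-- `for f in range(...)` lookup loop of B
def scanB (fst : List Char) (L : Nat) (occ : PySem.Dict (List Char) (Int × Int)) :
    List Nat → Option Int
  | [] => none
  | f :: fs =>
    match occ.get? (pySub fst f L) with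
    | some e => if e.1 = 1 then some e.2 else scanB fst L occ fs
    | none => scanB fst L occ fs

-- `for length in range(1, n)` loop of B
def lenLoopB (fst sec : List Char) : List Nat → Option Int
  | [] => none
  | L :: Ls =>
    match scanB fst L (buildOcc sec L) (List.range (fst.length + 1 - L)) with
    | some r => some r
    | none => lenLoopB fst sec Ls

def find_rotation_offset_alt (first : String) (second : String) : Int :=
  if first.toList.length ≠ second.toList.length then 0   -- Python raises ValueError (outside Pre_)
  else if first.toList = second.toList then 0
  else match lenLoopB first.toList second.toList (List.range' 1 (first.toList.length - 1)) with
    | some r => r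
    | none => 0                                          -- Python raises Exception (outside Pre_)

-- ===== PRECONDITION & SPEC =====
-- Pre_ excludes exactly the inputs where A raises: unequal lengths (ValueError), and unequal
-- same-length strings sharing no substring that occurs exactly once in second (Exception).
def Pre_find_rotation_offset (first : String) (second : String) : Prop :=
  first.toList.length = second.toList.length ∧
  (first.toList = second.toList ∨
    ∃ L ∈ List.range' 1 (first.toList.length - 1),
      ∃ f ∈ List.range (first.toList.length + 1 - L),
        (List.range (second.toList.length + 1 - L)).countP
          (fun k => pySub second.toList k L = pySub first.toList f L) = 1)
instance (first : String) (second : String) : Decidable (Pre_find_rotation_offset first second) := by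
  unfold Pre_find_rotation_offset; infer_instance

def pvWitness_find_rotation_offset : String × String := ("ab", "ba")

def Spec_find_rotation_offset (first : String) (second : String) (out : Int) : Prop := out = find_rotation_offset_alt first second
instance (first : String) (second : String) (out : Int) : Decidable (Spec_find_rotation_offset first second out) := by unfold Spec_find_rotation_offset; infer_instance

-- ===== CLAIM (what is proved, stated in full; the proofs are below) =====
def Claim_equal_find_rotation_offset : Prop := ∀ (first : String) (second : String), Dom_find_rotation_offset first second → Pre_find_rotation_offset first second → Spec_find_rotation_offset first second (find_rotation_offset first second)

-- ===== LEMMAS AND PROOFS =====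

theorem pySub_eq (xs : List Char) (f L : Nat) : pySub xs f L = (xs.drop f).take L := by
  simpa [pySub] using PySem.List.slice_natCast xs f (f + L)

theorem length_pySub {xs : List Char} {f L : Nat} (h : f + L ≤ xs.length) :
    (pySub xs f L).length = L := by
  simp [pySub_eq]; omega

theorem uniqLoopA_eq (sec sub : List Char) (L : Nat) (ks : List Nat) (u : Bool) :
    uniqLoopA sec sub L ks u =
      ((ks.countP (fun k => pySub sec k L = sub)) == (if u then 0 else 1)) := by
  induction ks generalizing u with
  | nil => cases u <;> simp [uniqLoopA]
  | cons k ks ih =>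
    by_cases hk : pySub sec k L = sub
    · cases u <;> simp [uniqLoopA, hk, ih]
    · simp [uniqLoopA, hk, ih]

theorem firstMatch_none_iff (sec : List Char) (L : Nat) (ks : List Nat) (sub : List Char) :
    firstMatch sec L ks sub = none ↔ ks.countP (fun k => pySub sec k L = sub) = 0 := by
  induction ks with
  | nil => simp [firstMatch]
  | cons k ks ih =>
    by_cases hk : pySub sec k L = sub <;>
      simp [firstMatch, hk, ih]

theorem buildOcc_get (sec : List Char) (L : Nat) (sub : List Char) (ks : List Nat)
    (d : PySem.Dict (List Char) (Int × Int)) :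
    (ks.foldl (fun d k =>
        d.insert (pySub sec k L)
          ((d.getD (pySub sec k L) (0, (k : Int))).1 + 1,
           (d.getD (pySub sec k L) (0, (k : Int))).2)) d).get? sub =
      match d.get? sub with
      | some e => some (e.1 + (ks.countP (fun k => pySub sec k L = sub) : Int), e.2)
      | none => (firstMatch sec L ks sub).map
          (fun p => ((ks.countP (fun k => pySub sec k L = sub) : Int), (p : Int))) := by
  induction ks generalizing d with
  | nil => cases h : d.get? sub <;> simp [h, firstMatch]
  | cons k ks ih =>
    rw [List.foldl_cons, ih]
    by_cases hk : pySub sec k L = sub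
    · rw [hk]
      cases h : d.get? sub with
      | some e =>
        rw [PySem.Dict.getD_of_get?_eq_some _ _ h]
        rw [PySem.Dict.get?_insert]
        simp only [List.countP_cons, hk]
        norm_num
        ring
      | none =>
        rw [PySem.Dict.getD_of_get?_eq_none _ _ h]
        rw [PySem.Dict.get?_insert]
        simp only [List.countP_cons, hk, firstMatch]
        norm_num
        omega
    · have hne : sub ≠ pySub sec k L := fun h => hk h.symm
      rw [PySem.Dict.get?_insert]
      simp only [if_neg hne, List.countP_cons, hk, firstMatch]
      norm_num

theorem scanB_eq (fst sec : List Char) (L : Nat) (fs : List Nat)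
    (hf : ∀ f ∈ fs, f + L ≤ fst.length) :
    scanB fst L (buildOcc sec L) fs =
      Option.map (fun i => (i : Int))
        (searchA sec (fs.filterMap (fun f =>
          if uniqLoopA sec (pySub fst f L) L (List.range (sec.length + 1 - L)) false then
            some (pySub fst f L)
          else none))) := by
  induction fs with
  | nil => simp [scanB, searchA]
  | cons f fs ih =>
    have hfL : f + L ≤ fst.length := hf f (by simp)
    have hlen : (pySub fst f L).length = L := length_pySub hfL
    have ih' := ih (fun x hx => hf x (List.mem_cons_of_mem _ hx))
    have hocc : (buildOcc sec L).get? (pySub fst f L) =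
        (firstMatch sec L (List.range (sec.length + 1 - L)) (pySub fst f L)).map
          (fun p => (((List.range (sec.length + 1 - L)).countP
              (fun k => pySub sec k L = pySub fst f L) : Int), (p : Int))) := by
      unfold buildOcc
      rw [buildOcc_get]
      simp [PySem.Dict.get?_empty]
    rw [List.filterMap_cons]
    by_cases hu : uniqLoopA sec (pySub fst f L) L (List.range (sec.length + 1 - L)) false = true
    · rw [if_pos hu]
      have hc1 : (List.range (sec.length + 1 - L)).countP
          (fun k => pySub sec k L = pySub fst f L) = 1 := by
        rw [uniqLoopA_eq] at hu; simpa using hu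
      obtain ⟨p, hp⟩ : ∃ p,
          firstMatch sec L (List.range (sec.length + 1 - L)) (pySub fst f L) = some p := by
        cases hm : firstMatch sec L (List.range (sec.length + 1 - L)) (pySub fst f L) with
        | none => exact absurd ((firstMatch_none_iff sec L _ _).mp hm) (by omega)
        | some p => exact ⟨p, rfl⟩
      rw [hp] at hocc
      simp only [scanB, hocc, hc1, searchA, hlen, hp]
      norm_num
    · rw [if_neg hu]
      have hcne : (List.range (sec.length + 1 - L)).countP
          (fun k => pySub sec k L = pySub fst f L) ≠ 1 := by
        intro hc; apply hu; rw [uniqLoopA_eq]; simp [hc]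
      simp only [scanB, hocc]
      cases hm : firstMatch sec L (List.range (sec.length + 1 - L)) (pySub fst f L) with
      | none => simpa using ih'
      | some p =>
        have hne : ((List.range (sec.length + 1 - L)).countP
            (fun k => pySub sec k L = pySub fst f L) : Int) ≠ 1 := by exact_mod_cast hcne
        simpa [hne] using ih'

theorem searchA_append (sec : List Char) (xs ys : List (List Char)) :
    searchA sec (xs ++ ys) =
      match searchA sec xs with
      | some i => some i
      | none => searchA sec ys := by
  induction xs with
  | nil => simp [searchA]
  | cons z zs ihz =>
    simp only [List.cons_append, searchA]
    cases firstMatch sec z.length (List.range (sec.length + 1 - z.length)) z <;> simp [ihz]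

theorem lenLoopB_eq (fst sec : List Char) (Ls : List Nat)
    (hL : ∀ L ∈ Ls, L ≤ fst.length) :
    lenLoopB fst sec Ls =
      Option.map (fun i => (i : Int))
        (searchA sec (Ls.flatMap (fun L =>
          (List.range (fst.length + 1 - L)).filterMap (fun f =>
            if uniqLoopA sec (pySub fst f L) L (List.range (sec.length + 1 - L)) false then
              some (pySub fst f L)
            else none)))) := by
  induction Ls with
  | nil => simp [lenLoopB, searchA]
  | cons L Ls ih =>
    have hf : ∀ f ∈ List.range (fst.length + 1 - L), f + L ≤ fst.length := by
      have hLn : L ≤ fst.length := hL L (by simp)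
      intro f hfm; have := List.mem_range.mp hfm; omega
    have ih' := ih (fun x hx => hL x (List.mem_cons_of_mem _ hx))
    have hs := scanB_eq fst sec L (List.range (fst.length + 1 - L)) hf
    rw [List.flatMap_cons, searchA_append]
    cases h : searchA sec ((List.range (fst.length + 1 - L)).filterMap (fun f =>
        if uniqLoopA sec (pySub fst f L) L (List.range (sec.length + 1 - L)) false then
          some (pySub fst f L)
        else none)) with
    | some i =>
      rw [h] at hs
      simp [lenLoopB, hs]
    | none =>
      rw [h] at hs
      simp only [lenLoopB, hs]
      exact ih'

-- ===== VERDICT (by name: the statement is the Claim_ definition above) =====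
theorem find_rotation_offset_spec : Claim_equal_find_rotation_offset := by
  intro first second _ hpre
  obtain ⟨hlen, -⟩ := hpre
  unfold Spec_find_rotation_offset find_rotation_offset find_rotation_offset_alt
  rw [if_neg (not_not_intro hlen), if_neg (not_not_intro hlen)]
  by_cases heq : first.toList = second.toList
  · rw [if_pos heq, if_pos heq]
  · rw [if_neg heq, if_neg heq]
    have h := lenLoopB_eq first.toList second.toList
        (List.range' 1 (first.toList.length - 1)) (by
      intro L hLm
      have := List.mem_range'_1.mp hLm
      omega)
    unfold uniqueSubstringsA
    rw [h]
    cases searchA second.toList _ <;> simp
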